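-- pv_equiv track=rewrite | github.com/pjw5521/Coding_Test_Algorithm | Programmers_Algorithm/level 1/키패드 누르기.py | solution
-- ===== SOURCE A (Python) =====
-- def solution(numbers, hand):
--     answer = ''
--     result = []
--     # *는 10, 0은 11, #은 12로 설정
--     right = 12
--     left = 10
--     for i in numbers:
--         if i in {1,4,7}:
--             left = i
--             answer += 'L'
--         elif i in {3,6,9}:
--             right = i
--             answer += 'R'
--         #상 +3 , 하 -3, 좌 +1, 우 -1 로 설정
--         #이동 거리는 3으로 나눈 몫과 나머지를 더한 값
--         elif i in {2,5,8,0}: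
--             if i == 0 :
--                 i = 11
--             left_len = abs(i-left) // 3 + abs(i-left) % 3
--             right_len = abs(i-right)// 3 + abs(i-right)% 3
--             if left_len < right_len:
--                 left = i
--                 answer += 'L'
--             elif left_len > right_len:
--                 right = i
--                 answer += 'R'
--             else:
--                 if hand == 'left':
--                     left = i
--                     answer += 'L'
--                 else :
--                     right = i
--                     answer += 'R'
--
--     return answer
-- ===== SOURCE B (Python) =====
-- def _dist(a, b):
--     r1, c1 = divmod(a - 1, 3)
--     r2, c2 = divmod(b - 1, 3)
--     return abs(r1 - r2) + abs(c1 - c2)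
--
--
-- def _build_table(prefer_left):
--     # Precompile the whole keypad geometry into a finite transition table:
--     # hands are key numbers (0 stored as 11; '*' = 10, '#' = 12),
--     # table[l][r][key] = (pressed char, new left, new right).
--     table = {}
--     for l in (1, 4, 7, 2, 5, 8, 10, 11):
--         row = {}
--         for r in (3, 6, 9, 2, 5, 8, 11, 12):
--             cell = {}
--             for key in (1, 2, 3, 4, 5, 6, 7, 8, 9, 0):
--                 k = 11 if key == 0 else key
--                 c = (k - 1) % 3
--                 if c == 0:
--                     entry = ('L', k, r)
--                 elif c == 2:
--                     entry = ('R', l, k)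
--                 elif _dist(k, l) < _dist(k, r) or (_dist(k, l) == _dist(k, r) and prefer_left):
--                     entry = ('L', k, r)
--                 else:
--                     entry = ('R', l, k)
--                 cell[key] = entry
--             row[r] = cell
--         table[l] = row
--     return table
--
--
-- def solution(numbers, hand):
--     table = _build_table(hand == 'left')
--     l, r = 10, 12
--     out = []
--     for n in numbers:
--         e = table[l][r].get(n)
--         if e is None:
--             continue
--         ch, l, r = e
--         out.append(ch)
--     return ''.join(out)
-- ===== Notes on version B (the rewrite author's own statement) =====
-- stated objective: alternative
-- what changed: B precompiles the keypad geometry into an explicit finite transition table over all reachable (left-hand, right-hand, key) states, built once from grid coordinates and Manhattan distance; the main loop is then a pure table-driven automaton with no arithmetic, whereas A computes distances online with its key-number //3+%3 trick and a three-way branch per step.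
import Mathlib
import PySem

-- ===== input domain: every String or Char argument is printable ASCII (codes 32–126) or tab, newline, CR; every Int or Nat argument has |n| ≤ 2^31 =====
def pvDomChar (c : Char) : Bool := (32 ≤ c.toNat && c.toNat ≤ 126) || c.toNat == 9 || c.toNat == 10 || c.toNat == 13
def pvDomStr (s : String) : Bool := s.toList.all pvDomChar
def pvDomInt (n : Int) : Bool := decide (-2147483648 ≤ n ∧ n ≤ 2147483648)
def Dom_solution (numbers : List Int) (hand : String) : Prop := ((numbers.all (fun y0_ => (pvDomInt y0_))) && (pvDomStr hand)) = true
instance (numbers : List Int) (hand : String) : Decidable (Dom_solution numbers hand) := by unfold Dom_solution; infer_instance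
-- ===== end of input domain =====

-- B precompiles the keypad geometry into a finite transition table over all reachable
-- (left hand, right hand, key) states and runs numbers through it as a table-driven automaton;
-- A computes distances online with key-number arithmetic. Same return value; no speed claim.
-- Both ports accumulate the answer as a List Char and build the String once at the end ('answer += c' / ''.join).

-- ===== PORT A =====
-- state = (answer, right, left), exactly A's variables
def stepA (hand : String) (st : List Char × Int × Int) (i : Int) : List Char × Int × Int :=
  let answer := st.1
  let right := st.2.1
  let left := st.2.2
  if i = 1 ∨ i = 4 ∨ i = 7 then (answer ++ ['L'], right, i)
  else if i = 3 ∨ i = 6 ∨ i = 9 then (answer ++ ['R'], i, left)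
  else if i = 2 ∨ i = 5 ∨ i = 8 ∨ i = 0 then
    let i := if i = 0 then 11 else i
    -- abs(i-left) ≥ 0, so Python's // 3 and % 3 are PySem floordiv/mod by the positive literal 3
    let left_len := PySem.Int.floordiv |i - left| 3 + PySem.Int.mod |i - left| 3
    let right_len := PySem.Int.floordiv |i - right| 3 + PySem.Int.mod |i - right| 3
    if left_len < right_len then (answer ++ ['L'], right, i)
    else if left_len > right_len then (answer ++ ['R'], i, left)
    else if hand = "left" then (answer ++ ['L'], right, i)
    else (answer ++ ['R'], i, left)
  else (answer, right, left)

def solution (numbers : List Int) (hand : String) : String :=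
  String.ofList (numbers.foldl (stepA hand) ([], 12, 10)).1

-- ===== PORT B =====
-- _dist: Manhattan distance between keys via divmod grid coordinates
def distB (a b : Int) : Int :=
  |PySem.Int.floordiv (a - 1) 3 - PySem.Int.floordiv (b - 1) 3| +
    |PySem.Int.mod (a - 1) 3 - PySem.Int.mod (b - 1) 3|

def leftKeys : List Int := [1, 4, 7, 2, 5, 8, 10, 11]
def rightKeys : List Int := [3, 6, 9, 2, 5, 8, 11, 12]
def allKeys : List Int := [1, 2, 3, 4, 5, 6, 7, 8, 9, 0]

-- _build_table: the full transition table; table[l][r][key] = (char, new left, new right)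
def buildTable (preferLeft : Bool) :
    PySem.Dict Int (PySem.Dict Int (PySem.Dict Int (Char × Int × Int))) :=
  leftKeys.foldl (fun table l =>
    table.insert l (rightKeys.foldl (fun row r =>
      row.insert r (allKeys.foldl (fun cell key =>
        let k := if key = 0 then 11 else key
        let c := PySem.Int.mod (k - 1) 3
        let entry :=
          if c = 0 then ('L', k, r)
          else if c = 2 then ('R', l, k)
          else if distB k l < distB k r ∨ (distB k l = distB k r ∧ preferLeft = true) then ('L', k, r)
          else ('R', l, k)
        cell.insert key entry) PySem.Dict.empty)) PySem.Dict.empty)) PySem.Dict.empty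

-- table[l][r].get(n): l and r are always present keys on the states B reaches, so the
-- getD with an empty-dict default is exact there (the default is never taken at runtime)
def lookup (t : PySem.Dict Int (PySem.Dict Int (PySem.Dict Int (Char × Int × Int))))
    (l r n : Int) : Option (Char × Int × Int) :=
  ((t.getD l PySem.Dict.empty).getD r PySem.Dict.empty).get? n

-- the body of B's main loop; state = (out, l, r)
def stepB (table : PySem.Dict Int (PySem.Dict Int (PySem.Dict Int (Char × Int × Int))))
    (st : List Char × Int × Int) (n : Int) : List Char × Int × Int :=
  match lookup table st.2.1 st.2.2 n with
  | none => st
  | some e => (st.1 ++ [e.1], e.2.1, e.2.2)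

def solution_alt (numbers : List Int) (hand : String) : String :=
  let table := buildTable (hand == "left")
  String.ofList (numbers.foldl (stepB table) ([], 10, 12)).1

-- ===== PRECONDITION & SPEC =====
def Spec_solution (numbers : List Int) (hand : String) (out : String) : Prop := out = solution_alt numbers hand
instance (numbers : List Int) (hand : String) (out : String) : Decidable (Spec_solution numbers hand out) := by unfold Spec_solution; infer_instance

-- ===== CLAIM (what is proved, stated in full; the proofs are below) =====
def Claim_equal_solution : Prop := ∀ (numbers : List Int) (hand : String), Dom_solution numbers hand → Spec_solution numbers hand (solution numbers hand)

-- ===== LEMMAS AND PROOFS =====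

-- what A's step produces on an in-range key, written as (char, new left, new right)
def expected (b : Bool) (l r k : Int) : Char × Int × Int :=
  if k = 1 ∨ k = 4 ∨ k = 7 then ('L', k, r)
  else if k = 3 ∨ k = 6 ∨ k = 9 then ('R', l, k)
  else
    let t := if k = 0 then 11 else k
    let ll := PySem.Int.floordiv |t - l| 3 + PySem.Int.mod |t - l| 3
    let rl := PySem.Int.floordiv |t - r| 3 + PySem.Int.mod |t - r| 3
    if ll < rl then ('L', t, r)
    else if ll > rl then ('R', l, t)
    else if b = true then ('L', t, r)
    else ('R', l, t)

-- the finite check: on every reachable state the table entry is exactly A's decision,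
-- and the new state is again reachable
def okP (b : Bool) : Bool :=
  leftKeys.all fun l => rightKeys.all fun r => allKeys.all fun k =>
    (lookup (buildTable b) l r k == some (expected b l r k)) &&
    decide ((expected b l r k).2.1 ∈ leftKeys) && decide ((expected b l r k).2.2 ∈ rightKeys)

set_option maxRecDepth 1000000 in
set_option maxHeartbeats 1000000 in
lemma okP_true : okP true = true := by decide

set_option maxRecDepth 1000000 in
set_option maxHeartbeats 1000000 in
lemma okP_false : okP false = true := by decide

lemma table_spec (b : Bool) (l r k : Int) (hl : l ∈ leftKeys) (hr : r ∈ rightKeys) (hk : k ∈ allKeys) :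
    lookup (buildTable b) l r k = some (expected b l r k) ∧
    (expected b l r k).2.1 ∈ leftKeys ∧ (expected b l r k).2.2 ∈ rightKeys := by
  have h : okP b = true := by cases b; exact okP_false; exact okP_true
  simp only [okP, List.all_eq_true, Bool.and_eq_true, beq_iff_eq, decide_eq_true_eq] at h
  obtain ⟨⟨h1, h2⟩, h3⟩ := h l hl r hr k hk
  exact ⟨h1, h2, h3⟩

lemma stepA_skip (hand : String) (st : List Char × Int × Int) (n : Int) (hn : n ∉ allKeys) :
    stepA hand st n = st := by
  simp only [allKeys, List.mem_cons, List.not_mem_nil, or_false, not_or] at hn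
  obtain ⟨n1, n2, n3, n4, n5, n6, n7, n8, n9, n0⟩ := hn
  simp [stepA, n1, n2, n3, n4, n5, n6, n7, n8, n9, n0]

-- every key stored in any cell of the table is one of the ten keypad keys
set_option maxRecDepth 1000000 in
set_option maxHeartbeats 1000000 in
lemma table_keys_inrange (b : Bool) :
    (buildTable b).items.all (fun row =>
      row.2.items.all (fun cell =>
        cell.2.items.all (fun e => decide (e.1 ∈ allKeys)))) = true := by
  cases b <;> decide

lemma lookup_none (b : Bool) (l r n : Int) (hn : n ∉ allKeys) :
    lookup (buildTable b) l r n = none := by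
  unfold lookup
  rcases h1 : (buildTable b).get? l with _ | row
  · rw [PySem.Dict.getD_of_get?_eq_none _ _ h1, PySem.Dict.getD_empty, PySem.Dict.get?_empty]
  · rw [PySem.Dict.getD_of_get?_eq_some _ _ h1]
    rcases h2 : row.get? r with _ | cell
    · rw [PySem.Dict.getD_of_get?_eq_none _ _ h2, PySem.Dict.get?_empty]
    · rw [PySem.Dict.getD_of_get?_eq_some _ _ h2]
      have hmem1 := PySem.Dict.mem_items_of_get?_eq_some _ h1
      have hmem2 := PySem.Dict.mem_items_of_get?_eq_some _ h2
      have hall := table_keys_inrange b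
      simp only [List.all_eq_true, decide_eq_true_eq] at hall
      rw [PySem.Dict.get?_eq_none_iff_not_mem_keys]
      intro hk
      simp only [PySem.Dict.keys, List.mem_map] at hk
      obtain ⟨e, he, hek⟩ := hk
      exact hn (hek ▸ hall _ hmem1 _ hmem2 e he)

set_option maxRecDepth 1000000 in
lemma stepA_expected (hand : String) (ans : List Char) (l r k : Int) (hk : k ∈ allKeys) :
    stepA hand (ans, r, l) k =
      (ans ++ [(expected (hand == "left") l r k).1],
       (expected (hand == "left") l r k).2.2,
       (expected (hand == "left") l r k).2.1) := by
  fin_cases hk <;>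
    simp only [stepA, expected] <;> norm_num <;>
      split_ifs with h1 h2 h3 <;> simp_all

set_option maxHeartbeats 1000000 in
lemma fold_sim (hand : String) : ∀ (ns : List Int) (ans : List Char) (l r : Int),
    l ∈ leftKeys → r ∈ rightKeys →
    (ns.foldl (stepA hand) (ans, r, l)).1
      = (ns.foldl (stepB (buildTable (hand == "left"))) (ans, l, r)).1 := by
  intro ns
  induction ns with
  | nil => intro ans l r _ _; simp only [List.foldl_nil]
  | cons n ns ih =>
    intro ans l r hl hr
    rw [List.foldl_cons, List.foldl_cons]
    by_cases hn : n ∈ allKeys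
    · obtain ⟨hget, hl', hr'⟩ := table_spec (hand == "left") l r n hl hr hn
      rw [stepA_expected hand ans l r n hn]
      have hB : stepB (buildTable (hand == "left")) (ans, l, r) n =
          (ans ++ [(expected (hand == "left") l r n).1],
           (expected (hand == "left") l r n).2.1,
           (expected (hand == "left") l r n).2.2) := by
        simp only [stepB, hget]
      rw [hB]
      exact ih _ _ _ hl' hr'
    · rw [stepA_skip hand _ n hn]
      have hB : stepB (buildTable (hand == "left")) (ans, l, r) n = (ans, l, r) := by
        simp only [stepB, lookup_none (hand == "left") l r n hn]
      rw [hB]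
      exact ih _ _ _ hl hr

-- ===== VERDICT (by name: the statement is the Claim_ definition above) =====
theorem solution_spec : Claim_equal_solution := by
  intro numbers hand _
  unfold Spec_solution solution solution_alt
  rw [fold_sim hand numbers [] 10 12 (by decide) (by decide)]
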